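-- pv_equiv track=rewrite | github.com/tdulcet/AutoPrimeNet | scripts/benchmark_gpuowl_log_guards.py | _need_ap1
-- ===== SOURCE A (Python) =====
-- def _need_ap1(line: str) -> bool:
-- 	i = line.find("P1 ")
-- 	if i < 1 or not line[i - 1].isdigit():
-- 		return False
-- 	j = i - 1
-- 	while j >= 0 and line[j].isdigit():
-- 		j -= 1
-- 	return i - 1 - j >= 6
-- ===== SOURCE B (Python) =====
-- def _need_ap1(line: str) -> bool:
-- 	i = line.find("P1 ")
-- 	return i >= 6 and line[i - 6:i].isdigit()
-- ===== Notes on version B (the rewrite author's own statement) =====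
-- stated objective: simpler
-- what changed: Replaces the backward while-loop that measures the whole digit run (plus its two guard branches) with a single fixed-window test: the six characters immediately before the first occurrence of the marker must all be digits.
import Mathlib
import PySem

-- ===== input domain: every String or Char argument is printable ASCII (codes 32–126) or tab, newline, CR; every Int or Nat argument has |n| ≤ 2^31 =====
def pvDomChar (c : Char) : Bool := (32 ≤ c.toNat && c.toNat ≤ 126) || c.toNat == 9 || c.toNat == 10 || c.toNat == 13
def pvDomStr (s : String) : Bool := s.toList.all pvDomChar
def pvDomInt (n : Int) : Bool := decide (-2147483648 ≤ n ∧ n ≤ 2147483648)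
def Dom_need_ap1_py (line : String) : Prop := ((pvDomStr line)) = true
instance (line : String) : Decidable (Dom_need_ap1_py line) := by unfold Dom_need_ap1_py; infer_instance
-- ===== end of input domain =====

-- B replaces A's backward digit-run-measuring loop with a single fixed six-character window test before the match (simpler).


-- ===== PORT A =====
-- line[j].isdigit() ; the none branch (IndexError) is never reached: A only indexes with 0 ≤ j < len(line)
def pvDigitAt (cs : List Char) (j : Int) : Bool :=
  match PySem.List.pyGet? cs j with
  | some c => PySem.Chars.isdigit c
  | none => false

-- 'j = i - 1; while j >= 0 and line[j].isdigit(): j -= 1' — returns the final j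
def pvAp1Back (cs : List Char) (j : Int) : Int :=
  if h : 0 ≤ j ∧ pvDigitAt cs j = true then pvAp1Back cs (j - 1) else j
termination_by (j + 1).toNat
decreasing_by omega

def need_ap1_py (line : String) : Bool :=
  let i := PySem.Str.find line "P1 "
  if i < 1 ∨ pvDigitAt line.toList (i - 1) = false then false
  else
    let j := pvAp1Back line.toList (i - 1)
    decide (6 ≤ i - 1 - j)

-- ===== PORT B =====
def need_ap1_py_alt (line : String) : Bool :=
  let i := PySem.Str.find line "P1 "
  decide (6 ≤ i) && PySem.Chars.strIsdigit (PySem.List.slice line.toList (some (i - 6)) (some i))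

-- ===== PRECONDITION & SPEC =====
def Spec_need_ap1_py (line : String) (out : Bool) : Prop := out = need_ap1_py_alt line
instance (line : String) (out : Bool) : Decidable (Spec_need_ap1_py line out) := by unfold Spec_need_ap1_py; infer_instance

-- ===== CLAIM (what is proved, stated in full; the proofs are below) =====
def Claim_equal_need_ap1_py : Prop := ∀ (line : String), Dom_need_ap1_py line → Spec_need_ap1_py line (need_ap1_py line)

-- ===== LEMMAS AND PROOFS =====

-- spec of A's backward loop: result r satisfies -1 ≤ r ≤ j, every index in (r, j] is a digit,
-- and r itself is -1 or a non-digit position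
theorem pvAp1Back_spec (cs : List Char) (j : Int) (hj : -1 ≤ j) :
    -1 ≤ pvAp1Back cs j ∧ pvAp1Back cs j ≤ j ∧
    (∀ k : Int, pvAp1Back cs j < k → k ≤ j → pvDigitAt cs k = true) ∧
    (pvAp1Back cs j = -1 ∨ pvDigitAt cs (pvAp1Back cs j) = false) := by
  generalize hn : (j + 1).toNat = n
  induction n generalizing j with
  | zero =>
    have hj0 : j = -1 := by omega
    subst hj0
    rw [pvAp1Back, dif_neg (by simp)]
    exact ⟨le_refl _, le_refl _, fun k h1 h2 => by omega, Or.inl rfl⟩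
  | succ n ih =>
    rw [pvAp1Back]
    by_cases h : 0 ≤ j ∧ pvDigitAt cs j = true
    · rw [dif_pos h]
      obtain ⟨h0, hd⟩ := h
      have := ih (j - 1) (by omega) (by omega)
      refine ⟨this.1, by omega, ?_, this.2.2.2⟩
      intro k hk1 hk2
      by_cases hkj : k = j
      · subst hkj; exact hd
      · exact this.2.2.1 k hk1 (by omega)
    · rw [dif_neg h]
      refine ⟨hj, le_refl j, ?_, ?_⟩
      · intro k hk1 hk2; omega
      · rcases (not_and_or.mp h) with h0 | hd
        · left; omega
        · right; simpa using hd

theorem pvDigitAt_eq (cs : List Char) (k : Int) (h0 : 0 ≤ k) (hl : k < cs.length) :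
    pvDigitAt cs k = PySem.Chars.isdigit (cs[k.toNat]'(by omega)) := by
  unfold pvDigitAt
  rw [PySem.List.pyGet?_of_nonneg cs h0]
  rw [List.getElem?_eq_getElem (by omega)]

-- ===== VERDICT (by name: the statement is the Claim_ definition above) =====
theorem need_ap1_py_spec : Claim_equal_need_ap1_py := by
  intro line _
  unfold Spec_need_ap1_py need_ap1_py need_ap1_py_alt
  simp only []
  have hfind : PySem.Str.find line "P1 " = PySem.Chars.find line.toList "P1 ".toList := by
    simp
  rw [hfind]
  set cs := line.toList with hcs
  set i := PySem.Chars.find cs "P1 ".toList with hi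
  by_cases h6 : 6 ≤ i
  · -- i ≥ 6 : both sides reduce to "the six chars before i are all digits"
    have hpos : 0 ≤ i := by omega
    have hpre := (PySem.Chars.find_spec (s := cs) (sub := "P1 ".toList) hpos).1
    have hlen : i.toNat + 3 ≤ cs.length := by
      have h3 : ("P1 ".toList).length = 3 := by decide
      have hdl := List.IsPrefix.length_le hpre
      rw [h3, List.length_drop] at hdl
      omega
    have hslice : PySem.List.slice cs (some (i - 6)) (some i)
        = (cs.drop (i - 6).toNat).take 6 := by
      rw [PySem.List.slice_toNat cs (by omega) (by omega)]
      congr 1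
      omega
    have hlen6 : ((cs.drop (i - 6).toNat).take 6).length = 6 := by
      simp
      omega
    have hget : ∀ (m : Nat), (hm : m < 6) →
        ((cs.drop (i - 6).toNat).take 6)[m]'(by simp; omega)
          = cs[(i - 6 + (m : Int)).toNat]'(by omega) := by
      intro m hm
      rw [List.getElem_take, List.getElem_drop]
      congr 1
      omega
    -- B's window test = "every of the 6 positions before i holds a digit"
    have hB : PySem.Chars.strIsdigit ((cs.drop (i - 6).toNat).take 6)
        = ((List.range 6).all fun m => pvDigitAt cs (i - 6 + (m : Int))) := by
      unfold PySem.Chars.strIsdigit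
      have hne : ((cs.drop (i - 6).toNat).take 6).isEmpty = false := by
        rw [List.isEmpty_eq_false_iff]
        intro hnil
        rw [hnil] at hlen6
        simp at hlen6
      rw [hne]
      simp only [Bool.not_false, Bool.true_and]
      rcases Bool.eq_false_or_eq_true
          (((cs.drop (i - 6).toNat).take 6).all PySem.Chars.isdigit) with hall | hall
      · rw [hall]
        symm
        rw [List.all_eq_true] at hall ⊢
        intro m hmm
        have hm' := List.mem_range.mp hmm
        rw [pvDigitAt_eq cs (i - 6 + m) (by omega) (by omega), ← hget m hm']
        exact hall _ (List.getElem_mem _)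
      · rw [hall]
        symm
        rw [List.all_eq_false] at hall ⊢
        obtain ⟨x, hx, hxd⟩ := hall
        rw [List.mem_iff_getElem] at hx
        obtain ⟨m, hm', hxe⟩ := hx
        rw [hlen6] at hm'
        refine ⟨m, List.mem_range.mpr hm', fun habs => ?_⟩
        rw [pvDigitAt_eq cs (i - 6 + m) (by omega) (by omega), ← hget m hm'] at habs
        rw [hxe] at habs
        exact hxd habs
    rw [hslice, hB]
    have hspec := pvAp1Back_spec cs (i - 1) (by omega)
    set r := pvAp1Back cs (i - 1) with hr
    by_cases hWt : ((List.range 6).all fun m => pvDigitAt cs (i - 6 + (m : Int))) = true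
    · have hwin : ∀ m : Nat, m < 6 → pvDigitAt cs (i - 6 + (m : Int)) = true := by
        intro m hm
        simpa using List.all_eq_true.mp hWt m (List.mem_range.mpr hm)
      have hd1 : pvDigitAt cs (i - 1) = true := by
        have h5 := hwin 5 (by omega)
        have he : i - 6 + ((5 : Nat) : Int) = i - 1 := by push_cast; omega
        rwa [he] at h5
      rw [if_neg (by simp only [not_or]; exact ⟨by omega, by simp [hd1]⟩)]
      have hrle : (6 : Int) ≤ i - 1 - r := by
        by_contra habs
        have hm' : r = i - 6 + (((r - (i - 6)).toNat : Nat) : Int) := by omega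
        have hdig := hwin (r - (i - 6)).toNat (by omega)
        rw [← hm'] at hdig
        rcases hspec.2.2.2 with h1 | h1
        · omega
        · rw [hdig] at h1
          simp at h1
      rw [hWt, Bool.and_true, decide_eq_true hrle, decide_eq_true h6]
    · have hWf : ((List.range 6).all fun m => pvDigitAt cs (i - 6 + (m : Int))) = false :=
        Bool.eq_false_iff.mpr hWt
      obtain ⟨m, hmmem, hmd⟩ := List.all_eq_false.mp hWf
      have hm6 := List.mem_range.mp hmmem
      have hmd' : pvDigitAt cs (i - 6 + (m : Int)) = false := Bool.eq_false_iff.mpr hmd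
      by_cases hd : pvDigitAt cs (i - 1) = false
      · rw [if_pos (Or.inr hd), hWf, Bool.and_false]
      · have hno : ¬ (6 : Int) ≤ i - 1 - r := by
          intro habs
          have hdig := hspec.2.2.1 (i - 6 + (m : Int)) (by omega) (by omega)
          rw [hdig] at hmd'
          simp at hmd'
        rw [if_neg (by simp only [not_or]; exact ⟨by omega, hd⟩)]
        rw [hWf, Bool.and_false, decide_eq_false hno]
  · -- i < 6 : both sides are false
    have hneg1 : -1 ≤ i := PySem.Chars.neg_one_le_find cs _
    have hB : (decide (6 ≤ i)
        && PySem.Chars.strIsdigit (PySem.List.slice cs (some (i - 6)) (some i))) = false := by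
      simp [h6]
    rw [hB]
    by_cases h1 : i < 1
    · rw [if_pos (Or.inl h1)]
    · by_cases hd : pvDigitAt cs (i - 1) = false
      · rw [if_pos (Or.inr hd)]
      · rw [if_neg (by simp only [not_or]; exact ⟨h1, hd⟩)]
        have hspec := pvAp1Back_spec cs (i - 1) (by omega)
        rw [decide_eq_false (by omega : ¬ (6 : Int) ≤ i - 1 - pvAp1Back cs (i - 1))]
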